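-- pv_equiv track=rewrite | github.com/michalhron/AI-futures | dashboard/data_utils.py | compatible_stances_for_vision
-- ===== SOURCE A (Python) =====
-- V2A_STANCED: dict[tuple[str, str], str] = {
--     ("Open Horizons, Unstable Ground", "Opening"): "Pioneer",
--     ("Open Horizons, Unstable Ground", "Mobilizing"): "Pioneer",
--     ("Open Horizons, Unstable Ground", "Normalizing"): "Pioneer",
--     ("Open Horizons, Unstable Ground", "Controlling"): "Guardian",
--     ("Empowered but Exposed", "Opening"): "Pioneer",
--     ("Empowered but Exposed", "Mobilizing"): "Builder",
--     ("Empowered but Exposed", "Normalizing"): "Guardian",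
--     ("Empowered but Exposed", "Controlling"): "Guardian",
--     ("Seamless but Concentrated", "Opening"): "Pioneer",
--     ("Seamless but Concentrated", "Mobilizing"): "Builder",
--     ("Seamless but Concentrated", "Normalizing"): "Pioneer",
--     ("Seamless but Concentrated", "Controlling"): "Guardian",
--     ("Transformed or Left Behind", "Opening"): "Pioneer",
--     ("Transformed or Left Behind", "Mobilizing"): "Builder",
--     ("Transformed or Left Behind", "Normalizing"): "Pioneer",
--     ("Transformed or Left Behind", "Controlling"): "Guardian",
--     ("Guided but Fragile", "Opening"): "Pioneer",
--     ("Guided but Fragile", "Mobilizing"): "Guardian",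
--     ("Guided but Fragile", "Normalizing"): "Guardian",
--     ("Guided but Fragile", "Controlling"): "Guardian",
-- }
--
-- def compatible_stances_for_vision(vision: str) -> set[str] | None:
--     """
--     Stances that appear in the table for this vision. Used when vision is set but archetypes are still empty.
--     """
--     if vision == "All":
--         return None
--     out: set[str] = set()
--     for (v, s), _arch in V2A_STANCED.items():
--         if v == vision:
--             out.add(s)
--     return out if out else None
-- ===== SOURCE B (Python) =====
-- # Precomputed literal reverse index: vision -> frozen set of stances appearing
-- # in the V2A_STANCED table for that vision (the table is a fixed module constant,
-- # so the index can be written out once instead of scanning the table per call).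
-- _INDEX: dict[str, frozenset[str]] = {
--     "Open Horizons, Unstable Ground": frozenset({"Opening", "Mobilizing", "Normalizing", "Controlling"}),
--     "Empowered but Exposed": frozenset({"Opening", "Mobilizing", "Normalizing", "Controlling"}),
--     "Seamless but Concentrated": frozenset({"Opening", "Mobilizing", "Normalizing", "Controlling"}),
--     "Transformed or Left Behind": frozenset({"Opening", "Mobilizing", "Normalizing", "Controlling"}),
--     "Guided but Fragile": frozenset({"Opening", "Mobilizing", "Normalizing", "Controlling"}),
-- }
--
-- def compatible_stances_for_vision(vision: str) -> set[str] | None: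
--     if vision == "All":
--         return None
--     stances = _INDEX.get(vision)
--     return set(stances) if stances is not None else None
-- ===== Notes on version B (the rewrite author's own statement) =====
-- stated objective: idiomatic
-- what changed: Replaces the per-call linear scan of the 20-entry V2A_STANCED table with a precomputed literal reverse index (vision -> frozenset of stances) and a single dict lookup, returning a fresh set copy.
import Mathlib
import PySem

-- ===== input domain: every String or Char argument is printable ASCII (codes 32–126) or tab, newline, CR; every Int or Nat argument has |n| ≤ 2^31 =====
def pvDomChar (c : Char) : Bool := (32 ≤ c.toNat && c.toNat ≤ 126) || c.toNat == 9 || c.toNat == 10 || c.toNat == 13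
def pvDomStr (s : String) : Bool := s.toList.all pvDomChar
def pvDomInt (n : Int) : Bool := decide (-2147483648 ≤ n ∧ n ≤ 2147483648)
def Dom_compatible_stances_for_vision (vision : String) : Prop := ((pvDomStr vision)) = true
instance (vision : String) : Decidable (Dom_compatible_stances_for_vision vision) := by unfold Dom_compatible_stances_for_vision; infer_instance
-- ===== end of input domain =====

-- B replaces A's per-call scan of the fixed table by a precomputed literal reverse index (vision -> stance set) and one dict lookup (objective: idiomatic).

-- ===== PORT A =====
-- the module-level dict V2A_STANCED, as an insertion-ordered association list
def pvTable : List ((String × String) × String) := [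
  (("Open Horizons, Unstable Ground", "Opening"), "Pioneer"),
  (("Open Horizons, Unstable Ground", "Mobilizing"), "Pioneer"),
  (("Open Horizons, Unstable Ground", "Normalizing"), "Pioneer"),
  (("Open Horizons, Unstable Ground", "Controlling"), "Guardian"),
  (("Empowered but Exposed", "Opening"), "Pioneer"),
  (("Empowered but Exposed", "Mobilizing"), "Builder"),
  (("Empowered but Exposed", "Normalizing"), "Guardian"),
  (("Empowered but Exposed", "Controlling"), "Guardian"),
  (("Seamless but Concentrated", "Opening"), "Pioneer"),
  (("Seamless but Concentrated", "Mobilizing"), "Builder"),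
  (("Seamless but Concentrated", "Normalizing"), "Pioneer"),
  (("Seamless but Concentrated", "Controlling"), "Guardian"),
  (("Transformed or Left Behind", "Opening"), "Pioneer"),
  (("Transformed or Left Behind", "Mobilizing"), "Builder"),
  (("Transformed or Left Behind", "Normalizing"), "Pioneer"),
  (("Transformed or Left Behind", "Controlling"), "Guardian"),
  (("Guided but Fragile", "Opening"), "Pioneer"),
  (("Guided but Fragile", "Mobilizing"), "Guardian"),
  (("Guided but Fragile", "Normalizing"), "Guardian"),
  (("Guided but Fragile", "Controlling"), "Guardian")]

def compatible_stances_for_vision (vision : String) : Option (List String) :=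
  if vision == "All" then none
  else
    let out : PySem.Set String :=
      pvTable.foldl (fun out p => if p.1.1 == vision then PySem.Set.add out p.1.2 else out)
        PySem.Set.empty
    if List.isEmpty out then none else some out

-- ===== PORT B =====
-- _INDEX: the precomputed literal reverse index of Source B (vision -> frozenset of stances)
def pvIndex : PySem.Dict String (PySem.Set String) := PySem.Dict.ofList [
  ("Open Horizons, Unstable Ground", PySem.Set.ofList ["Opening", "Mobilizing", "Normalizing", "Controlling"]),
  ("Empowered but Exposed", PySem.Set.ofList ["Opening", "Mobilizing", "Normalizing", "Controlling"]),
  ("Seamless but Concentrated", PySem.Set.ofList ["Opening", "Mobilizing", "Normalizing", "Controlling"]),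
  ("Transformed or Left Behind", PySem.Set.ofList ["Opening", "Mobilizing", "Normalizing", "Controlling"]),
  ("Guided but Fragile", PySem.Set.ofList ["Opening", "Mobilizing", "Normalizing", "Controlling"])]

def compatible_stances_for_vision_alt (vision : String) : Option (List String) :=
  if vision == "All" then none
  else
    match pvIndex.get? vision with
    | none => none
    | some stances => some (PySem.Set.ofList stances)   -- set(stances): a fresh copy

-- ===== PRECONDITION & SPEC =====
def Spec_compatible_stances_for_vision (vision : String) (out : Option (List String)) : Prop := out = compatible_stances_for_vision_alt vision
instance (vision : String) (out : Option (List String)) : Decidable (Spec_compatible_stances_for_vision vision out) := by unfold Spec_compatible_stances_for_vision; infer_instance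

-- ===== CLAIM =====
def Claim_equal_compatible_stances_for_vision : Prop := ∀ (vision : String), Dom_compatible_stances_for_vision vision → Spec_compatible_stances_for_vision vision (compatible_stances_for_vision vision)

-- ===== LEMMAS AND PROOFS =====

lemma pvFoldNe (vision : String) (l : List ((String × String) × String))
    (acc : PySem.Set String) (h : ∀ p ∈ l, p.1.1 ≠ vision) :
    l.foldl (fun out p => if p.1.1 = vision then PySem.Set.add out p.1.2 else out) acc = acc := by
  induction l generalizing acc with
  | nil => rfl
  | cons p t ih =>
    have hp : p.1.1 ≠ vision := h p (by simp)
    simp only [List.foldl, if_neg hp]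
    exact ih acc (fun q hq => h q (by simp [hq]))

-- ===== VERDICT =====
theorem compatible_stances_for_vision_spec : Claim_equal_compatible_stances_for_vision := by
  intro vision _
  unfold Spec_compatible_stances_for_vision
  by_cases hAll : vision = "All"; · subst hAll; rfl
  by_cases h1 : vision = "Open Horizons, Unstable Ground"; · subst h1; decide
  by_cases h2 : vision = "Empowered but Exposed"; · subst h2; decide
  by_cases h3 : vision = "Seamless but Concentrated"; · subst h3; decide
  by_cases h4 : vision = "Transformed or Left Behind"; · subst h4; decide
  by_cases h5 : vision = "Guided but Fragile"; · subst h5; decide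
  have hfold : pvTable.foldl
      (fun out p => if p.1.1 = vision then PySem.Set.add out p.1.2 else out)
      PySem.Set.empty = PySem.Set.empty :=
    pvFoldNe vision pvTable PySem.Set.empty (by
      intro p hp
      fin_cases hp <;>
        first
          | exact Ne.symm h1 | exact Ne.symm h2 | exact Ne.symm h3
          | exact Ne.symm h4 | exact Ne.symm h5)
  have hfind : List.find? (fun p => p.1 == vision) pvIndex.items = none := by
    have hitems : pvIndex.items =
        [("Open Horizons, Unstable Ground", PySem.Set.ofList ["Opening", "Mobilizing", "Normalizing", "Controlling"]),
         ("Empowered but Exposed", PySem.Set.ofList ["Opening", "Mobilizing", "Normalizing", "Controlling"]),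
         ("Seamless but Concentrated", PySem.Set.ofList ["Opening", "Mobilizing", "Normalizing", "Controlling"]),
         ("Transformed or Left Behind", PySem.Set.ofList ["Opening", "Mobilizing", "Normalizing", "Controlling"]),
         ("Guided but Fragile", PySem.Set.ofList ["Opening", "Mobilizing", "Normalizing", "Controlling"])] := by rfl
    rw [hitems]
    rw [List.find?_cons_of_neg (by simpa using Ne.symm h1),
        List.find?_cons_of_neg (by simpa using Ne.symm h2),
        List.find?_cons_of_neg (by simpa using Ne.symm h3),
        List.find?_cons_of_neg (by simpa using Ne.symm h4),
        List.find?_cons_of_neg (by simpa using Ne.symm h5)]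
    rfl
  simp only [compatible_stances_for_vision, compatible_stances_for_vision_alt,
    beq_iff_eq, if_neg hAll, hfold]
  rw [show pvIndex.get? vision = none from by
        simp only [PySem.Dict.get?, hfind, Option.map_none]]
  rfl
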